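-- pv_equiv track=rewrite | github.com/ChantelleAA/wind-turbine-anomaly | src/evaluation/metrics.py | get_anomaly_segments
-- ===== SOURCE A (Python) =====
-- def get_anomaly_segments(y_true):
--     segments = []
--     in_anomaly = False
--     for i, v in enumerate(y_true):
--         if v == 1 and not in_anomaly:
--             start = i
--             in_anomaly = True
--         elif v == 0 and in_anomaly:
--             segments.append((start, i))
--             in_anomaly = False
--     return segments
-- ===== SOURCE B (Python) =====
-- def get_anomaly_segments(y_true):
--     segments = []
--     n = len(y_true)
--     i = 0
--     while i < n:
--         if y_true[i] == 1:
--             j = i + 1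
--             while j < n and y_true[j] != 0:
--                 j += 1
--             if j == n:
--                 break
--             segments.append((i, j))
--             i = j + 1
--         else:
--             i += 1
--     return segments
-- ===== Notes on version B (the rewrite author's own statement) =====
-- stated objective: alternative
-- what changed: Replaces the single flag-driven enumerate pass carrying an in_anomaly flag with an outer index loop that, on seeing a 1, runs an inner forward scan to the first 0 (emitting nothing if the scan runs off the end) and resumes after it.
import Mathlib
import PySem

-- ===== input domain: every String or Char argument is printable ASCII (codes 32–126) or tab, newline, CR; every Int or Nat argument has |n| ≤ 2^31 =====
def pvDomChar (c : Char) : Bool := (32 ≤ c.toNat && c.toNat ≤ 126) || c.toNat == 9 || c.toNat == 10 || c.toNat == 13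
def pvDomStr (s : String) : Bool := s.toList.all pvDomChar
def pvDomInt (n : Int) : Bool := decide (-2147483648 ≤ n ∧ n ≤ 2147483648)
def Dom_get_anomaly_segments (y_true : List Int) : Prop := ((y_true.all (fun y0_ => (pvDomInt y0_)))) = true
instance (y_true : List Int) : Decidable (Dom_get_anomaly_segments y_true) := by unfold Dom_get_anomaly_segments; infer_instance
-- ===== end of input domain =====

-- B replaces A's single flag-driven pass by an outer index loop with an inner forward scan to the closing 0 (objective: alternative decomposition, same cost).

-- ===== PORT A =====
-- A's for-loop over enumerate with state (segments, in_anomaly, start); start is 0-initialised,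
-- it is only read after in_anomaly has been set (as in the Python, where it is assigned before first use).
def gaLoop (xs : List Int) (i : Int) (segs : List (Int × Int)) (inA : Bool) (start : Int) : List (Int × Int) :=
  match xs with
  | [] => segs
  | v :: rest =>
    if v = 1 ∧ inA = false then gaLoop rest (i + 1) segs true i
    else if v = 0 ∧ inA = true then gaLoop rest (i + 1) (segs ++ [(start, i)]) false start
    else gaLoop rest (i + 1) segs inA start

def get_anomaly_segments (y_true : List Int) : List (Int × Int) :=
  gaLoop y_true 0 [] false 0

-- ===== PORT B =====
-- inner while-loop: scan for the first 0; returns its index and the list after it (none = ran off the end)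
def gbScan (xs : List Int) (j : Int) : Option (Int × List Int) :=
  match xs with
  | [] => none
  | v :: rest => if v = 0 then some (j, rest) else gbScan rest (j + 1)

theorem gbScan_length {xs : List Int} {j j' : Int} {rest' : List Int}
    (h : gbScan xs j = some (j', rest')) : rest'.length < xs.length := by
  induction xs generalizing j with
  | nil => simp [gbScan] at h
  | cons v rest ih =>
    simp only [gbScan] at h
    split at h
    · cases h; simp
    · exact Nat.lt_trans (ih h) (by simp)

-- outer while-loop over the remaining suffix and its start index
def gbOuter (xs : List Int) (i : Int) : List (Int × Int) :=
  match hxs : xs with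
  | [] => []
  | v :: rest =>
    if v = 1 then
      match hs : gbScan rest (i + 1) with
      | none => []
      | some (j, rest') => (i, j) :: gbOuter rest' (j + 1)
    else gbOuter rest (i + 1)
termination_by xs.length
decreasing_by
  · exact Nat.lt_succ_of_lt (gbScan_length hs)
  · simp

def get_anomaly_segments_alt (y_true : List Int) : List (Int × Int) :=
  gbOuter y_true 0

-- ===== PRECONDITION & SPEC =====
def Spec_get_anomaly_segments (y_true : List Int) (out : List (Int × Int)) : Prop := out = get_anomaly_segments_alt y_true
instance (y_true : List Int) (out : List (Int × Int)) : Decidable (Spec_get_anomaly_segments y_true out) := by unfold Spec_get_anomaly_segments; infer_instance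

-- ===== CLAIM (what is proved, stated in full; the proofs are below) =====
def Claim_equal_get_anomaly_segments : Prop := ∀ (y_true : List Int), Dom_get_anomaly_segments y_true → Spec_get_anomaly_segments y_true (get_anomaly_segments y_true)

-- ===== LEMMAS AND PROOFS =====

-- Main invariant, both flag states at once, by strong induction on the list length:
-- with the flag down, gaLoop appends exactly gbOuter's segments; with the flag up,
-- gaLoop behaves like the inner scan gbScan followed by gbOuter on the remainder.
theorem ga_gb (n : Nat) : ∀ (xs : List Int), xs.length ≤ n → ∀ (i : Int) (segs : List (Int × Int)),
    (∀ start : Int, gaLoop xs i segs false start = segs ++ gbOuter xs i) ∧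
    (∀ start : Int, gaLoop xs i segs true start =
      match gbScan xs i with
      | none => segs
      | some (j, rest') => (segs ++ [(start, j)]) ++ gbOuter rest' (j + 1)) := by
  induction n with
  | zero =>
    intro xs hlen i segs
    have : xs = [] := List.eq_nil_of_length_eq_zero (Nat.le_zero.mp hlen)
    subst this
    simp [gaLoop, gbOuter, gbScan]
  | succ n ih =>
    intro xs hlen i segs
    cases xs with
    | nil => simp [gaLoop, gbOuter, gbScan]
    | cons v rest =>
      have hr : rest.length ≤ n := by simpa using Nat.succ_le_succ_iff.mp hlen
      constructor
      · -- flag down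
        intro s0
        by_cases hv1 : v = 1
        · -- opens a run at i
          have h1 := (ih rest hr (i + 1) segs).2 i
          rw [gaLoop, if_pos ⟨hv1, rfl⟩, h1, gbOuter, if_pos hv1]
          cases hs : gbScan rest (i + 1) with
          | none => simp
          | some p =>
            obtain ⟨j, rest'⟩ := p
            simp
        · -- does not open: just advance
          have h1 := (ih rest hr (i + 1) segs).1 s0
          rw [gaLoop, if_neg (by simp [hv1]), if_neg (by simp), h1, gbOuter, if_neg hv1]
      · -- flag up
        intro start
        by_cases hv0 : v = 0
        · -- closes at i
          have h1 := (ih rest hr (i + 1) (segs ++ [(start, i)])).1 start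
          rw [gaLoop, if_neg (by simp [hv0]), if_pos ⟨hv0, rfl⟩, h1, gbScan, if_pos hv0]
        · -- stays in the run
          have h1 := (ih rest hr (i + 1) segs).2 start
          rw [gaLoop, if_neg (by simp), if_neg (by simp [hv0]), h1, gbScan, if_neg hv0]

-- ===== VERDICT (by name: the statement is the Claim_ definition above) =====
theorem get_anomaly_segments_spec : Claim_equal_get_anomaly_segments := by
  intro y_true _
  unfold Spec_get_anomaly_segments get_anomaly_segments get_anomaly_segments_alt
  simpa using (ga_gb y_true.length y_true (le_refl _) 0 []).1 0
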